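-- pv_equiv track=rewrite | github.com/rigzlion8/cybertech | modules/database_checker.py | _calculate_db_score
-- ===== SOURCE A (Python) =====
-- def _calculate_db_score(results):
--     """Calculate database security score"""
--     score = 100
--
--     for issue in results['security_issues']:
--         severity = issue.get('severity', 'low')
--         if severity == 'critical':
--             score -= 30
--         elif severity == 'high':
--             score -= 20
--         elif severity == 'medium':
--             score -= 10
--         else:
--             score -= 5
--
--     return max(0, score)
-- ===== SOURCE B (Python) =====
-- def _calculate_db_score(results):
--     """Calculate database security score (aggregate-then-weight)."""
--     counts = {}
--     for issue in results['security_issues']: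
--         sev = issue.get('severity', 'low')
--         counts[sev] = counts.get(sev, 0) + 1
--     weights = {'critical': 30, 'high': 20, 'medium': 10}
--     score = 100 - sum(c * weights.get(sev, 5) for sev, c in counts.items())
--     return max(0, score)
-- ===== Notes on version B (the rewrite author's own statement) =====
-- stated objective: alternative
-- what changed: Replaces the per-issue branch-and-subtract accumulation with an aggregate-then-weight decomposition: one pass builds a frequency table of severities, then the score is 100 minus the sum of count*weight over the distinct severities (unknown severities weigh 5), clamped at 0.
import Mathlib
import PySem

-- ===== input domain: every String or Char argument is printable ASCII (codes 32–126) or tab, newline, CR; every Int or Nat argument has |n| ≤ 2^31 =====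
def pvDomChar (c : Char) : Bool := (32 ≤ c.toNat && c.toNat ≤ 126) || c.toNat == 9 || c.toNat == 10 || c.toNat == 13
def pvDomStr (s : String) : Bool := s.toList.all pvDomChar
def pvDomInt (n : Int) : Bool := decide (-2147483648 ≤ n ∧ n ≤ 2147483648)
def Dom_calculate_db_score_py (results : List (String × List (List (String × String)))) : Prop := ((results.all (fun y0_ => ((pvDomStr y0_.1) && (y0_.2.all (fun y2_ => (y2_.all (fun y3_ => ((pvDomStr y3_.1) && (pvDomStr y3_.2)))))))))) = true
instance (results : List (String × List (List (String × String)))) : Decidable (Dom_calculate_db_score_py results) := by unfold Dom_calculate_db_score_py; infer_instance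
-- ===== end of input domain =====

-- B replaces the per-issue branch-and-subtract loop by aggregate-then-weight (frequency table, then count*weight sum); same cost, different decomposition.

-- ===== PORT A =====
def calculate_db_score_py (results : List (String × List (List (String × String)))) : Int :=
  -- results['security_issues'] raises KeyError when the key is missing: excluded by Pre_ (getD [] there)
  let issues := ((PySem.Dict.mk results).get? "security_issues").getD []
  let score := issues.foldl (fun score issue =>
      let severity := (PySem.Dict.mk issue).getD "severity" "low"
      if severity = "critical" then score - 30
      else if severity = "high" then score - 20
      else if severity = "medium" then score - 10
      else score - 5) 100
  max 0 score

-- ===== PORT B =====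
def calculate_db_score_py_alt (results : List (String × List (List (String × String)))) : Int :=
  let issues := ((PySem.Dict.mk results).get? "security_issues").getD []
  let counts := issues.foldl (fun d issue =>
      let sev := (PySem.Dict.mk issue).getD "severity" "low"
      d.insert sev (d.getD sev 0 + 1)) PySem.Dict.empty
  let weights : PySem.Dict String Int := PySem.Dict.mk [("critical", 30), ("high", 20), ("medium", 10)]
  let score := 100 - (counts.items.map (fun p => p.2 * weights.getD p.1 5)).sum
  max 0 score

-- ===== PRECONDITION & SPEC =====
-- Pre_ excludes exactly the inputs without a 'security_issues' key, on which Python A raises KeyError.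
def Pre_calculate_db_score_py (results : List (String × List (List (String × String)))) : Prop :=
  (PySem.Dict.mk results).contains "security_issues" = true
instance (results : List (String × List (List (String × String)))) : Decidable (Pre_calculate_db_score_py results) := by unfold Pre_calculate_db_score_py; infer_instance
def pvWitness_calculate_db_score_py : (List (String × List (List (String × String)))) :=
  [("security_issues", [[("severity", "high")], []])]

def Spec_calculate_db_score_py (results : List (String × List (List (String × String)))) (out : Int) : Prop := out = calculate_db_score_py_alt results
instance (results : List (String × List (List (String × String)))) (out : Int) : Decidable (Spec_calculate_db_score_py results out) := by unfold Spec_calculate_db_score_py; infer_instance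

-- ===== CLAIM (what is proved, stated in full; the proofs are below) =====
def Claim_equal_calculate_db_score_py : Prop := ∀ (results : List (String × List (List (String × String)))), Dom_calculate_db_score_py results → Pre_calculate_db_score_py results → Spec_calculate_db_score_py results (calculate_db_score_py results)

-- ===== LEMMAS AND PROOFS =====

/-- The severity weight both programs assign. -/
def pvW (s : String) : Int :=
  if s = "critical" then 30 else if s = "high" then 20 else if s = "medium" then 10 else 5

/-- The severity of an issue, as both programs read it. -/
def pvSev (issue : List (String × String)) : String :=
  (PySem.Dict.mk issue).getD "severity" "low"

lemma weights_getD (s : String) :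
    (PySem.Dict.mk [("critical", (30:Int)), ("high", 20), ("medium", 10)]).getD s 5 = pvW s := by
  simp only [PySem.Dict.getD_eq_get?_getD, PySem.Dict.get?_mk_cons, beq_iff_eq, pvW]
  by_cases h1 : "critical" = s <;> by_cases h2 : "high" = s <;> by_cases h3 : "medium" = s <;>
    simp_all [eq_comm, PySem.Dict.get?]

lemma sum_map_single (w : String → Int) (x : String) :
    ∀ (keys : List String), keys.Nodup → x ∈ keys →
      (keys.map (fun k => if k = x then w k else 0)).sum = w x := by
  intro keys hnd hx
  induction keys with
  | nil => cases hx
  | cons k t ih =>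
    rcases List.mem_cons.mp hx with h | h
    · subst h
      have : ∀ y ∈ t, (fun k => if k = x then w k else 0) y = 0 := by
        intro y hy
        have : y ≠ x := fun e => (List.nodup_cons.mp hnd).1 (e ▸ hy)
        simp [this]
      rw [List.map_cons, List.sum_cons, if_pos rfl, List.map_congr_left this]
      simp
    · have hk : k ≠ x := fun e => (List.nodup_cons.mp hnd).1 (e ▸ h)
      simp [hk, ih (List.nodup_cons.mp hnd).2 h]

lemma sum_count_keys (w : String → Int) :
    ∀ (xs keys : List String), keys.Nodup → (∀ x ∈ xs, x ∈ keys) →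
      (keys.map (fun k => (xs.count k : Int) * w k)).sum = (xs.map w).sum := by
  intro xs
  induction xs with
  | nil => intro keys _ _; simp
  | cons x t ih =>
    intro keys hnd hmem
    have hx : x ∈ keys := hmem x (List.mem_cons_self)
    have hsplit : ∀ k, ((x :: t).count k : Int) * w k
        = (t.count k : Int) * w k + (if k = x then w k else 0) := by
      intro k
      by_cases h : k = x
      · subst h; simp; ring
      · have h' : ¬ x = k := fun e => h e.symm
        simp [h, h']
    calc (keys.map (fun k => ((x :: t).count k : Int) * w k)).sum
        = (keys.map (fun k => (t.count k : Int) * w k + (if k = x then w k else 0))).sum := by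
          exact congrArg List.sum (List.map_congr_left (fun k _ => hsplit k))
      _ = (keys.map (fun k => (t.count k : Int) * w k)).sum
            + (keys.map (fun k => if k = x then w k else 0)).sum := by
          exact PySem.List.sum_map_add_int keys _ _
      _ = (t.map w).sum + w x := by
          rw [ih keys hnd (fun y hy => hmem y (List.mem_cons_of_mem _ hy)),
              sum_map_single w x keys hnd hx]
      _ = ((x :: t).map w).sum := by simp; ring

-- general fact not found in Mathlib/PySem by search; proved here
lemma sum_map_neg_int (l : List (List (String × String))) (g : List (String × String) → Int) :
    (l.map (fun i => -g i)).sum = -(l.map g).sum := by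
  induction l with
  | nil => simp
  | cons a t ih => simp [ih]; ring

lemma scoreA_eq (issues : List (List (String × String))) :
    issues.foldl (fun score issue =>
      let severity := (PySem.Dict.mk issue).getD "severity" "low"
      if severity = "critical" then score - 30
      else if severity = "high" then score - 20
      else if severity = "medium" then score - 10
      else score - 5) 100
    = 100 - ((issues.map pvSev).map pvW).sum := by
  have hb : issues.foldl (fun score issue =>
      let severity := (PySem.Dict.mk issue).getD "severity" "low"
      if severity = "critical" then score - 30
      else if severity = "high" then score - 20
      else if severity = "medium" then score - 10
      else score - 5) 100
      = issues.foldl (fun score issue => score + (-(pvW (pvSev issue)))) 100 := by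
    apply PySem.List.foldl_congr_mem
    intro acc issue _
    simp only [pvW, pvSev]
    split_ifs <;> ring
  rw [hb, PySem.List.foldl_add]
  have : (issues.map fun issue => -pvW (pvSev issue)).sum
      = -((issues.map pvSev).map pvW).sum := by
    rw [List.map_map]
    exact sum_map_neg_int issues (fun issue => pvW (pvSev issue))
  rw [this]; ring

lemma sumB_eq (issues : List (List (String × String))) :
    ((issues.foldl (fun d issue =>
        let sev := (PySem.Dict.mk issue).getD "severity" "low"
        d.insert sev (d.getD sev 0 + 1)) PySem.Dict.empty).items.map
      (fun p => p.2 * (PySem.Dict.mk [("critical", (30:Int)), ("high", 20), ("medium", 10)]).getD p.1 5)).sum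
    = ((issues.map pvSev).map pvW).sum := by
  have hc : issues.foldl (fun d issue =>
        let sev := (PySem.Dict.mk issue).getD "severity" "low"
        d.insert sev (d.getD sev 0 + 1)) PySem.Dict.empty
      = PySem.Dict.counter (issues.map pvSev) := by
    rw [← PySem.Dict.foldl_insert_getD_add_one_eq_counter, List.foldl_map]
    rfl
  rw [hc, PySem.Dict.items_counter, List.map_map]
  have : ((PySem.Set.ofList (issues.map pvSev)).map
        ((fun p : String × Int => p.2 * (PySem.Dict.mk [("critical", (30:Int)), ("high", 20), ("medium", 10)]).getD p.1 5)
          ∘ fun k => (k, ((issues.map pvSev).count k : Int)))).sum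
      = ((PySem.Set.ofList (issues.map pvSev)).map
          (fun k => ((issues.map pvSev).count k : Int) * pvW k)).sum := by
    apply congrArg List.sum
    apply List.map_congr_left
    intro k _
    simp [Function.comp, weights_getD]
  rw [this]
  exact sum_count_keys pvW (issues.map pvSev) _ (PySem.Set.nodup_ofList _)
    (fun x hx => (PySem.Set.mem_ofList _ _).mpr hx)

-- ===== VERDICT (by name: the statement is the Claim_ definition above) =====
theorem calculate_db_score_py_spec : Claim_equal_calculate_db_score_py := by
  intro results _ _
  unfold Spec_calculate_db_score_py calculate_db_score_py calculate_db_score_py_alt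
  simp only [scoreA_eq, sumB_eq]
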